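-- pv_equiv track=rewrite | github.com/ShrikrishnaR-2004/Leetcode-Solution | 2602-maximum-enemy-forts-that-can-be-captured/2602-maximum-enemy-forts-that-can-be-captured.py | captureForts
-- ===== SOURCE A (Python) =====
-- from typing import List
--
-- def captureForts(forts: List[int]) -> int:
--     count = 0
--     left = 0
--     for right in range(len(forts)):
--         if forts[right] != 0:
--             if (forts[left] == 1 and forts[right] == -1) or (forts[left] == -1 and forts[right] ==1):
--                 count = max(count, right - left - 1)
--             left = right
--     return count
-- ===== SOURCE B (Python) =====
-- def captureForts(forts):
--     # Run-length encode the array into [value, count] groups, then the answer is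
--     # the largest zero-run whose two neighbouring groups have opposite sign (+1/-1).
--     runs = []
--     for v in forts:
--         if runs and runs[-1][0] == v:
--             runs[-1][1] += 1
--         else:
--             runs.append([v, 1])
--     return max((c for (a, _), (m, c), (b, _) in zip(runs, runs[1:], runs[2:])
--                 if m == 0 and a * b == -1), default=0)
-- ===== Notes on version B (the rewrite author's own statement) =====
-- stated objective: alternative
-- what changed: A walks indices once keeping a 'left' pointer and re-reading forts[left]; B instead run-length encodes the array into (value, count) groups and takes the max count over group triples (a,_),(0,c),(b,_) with a*b == -1, i.e. zero-runs flanked by opposite forts.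
import Mathlib
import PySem

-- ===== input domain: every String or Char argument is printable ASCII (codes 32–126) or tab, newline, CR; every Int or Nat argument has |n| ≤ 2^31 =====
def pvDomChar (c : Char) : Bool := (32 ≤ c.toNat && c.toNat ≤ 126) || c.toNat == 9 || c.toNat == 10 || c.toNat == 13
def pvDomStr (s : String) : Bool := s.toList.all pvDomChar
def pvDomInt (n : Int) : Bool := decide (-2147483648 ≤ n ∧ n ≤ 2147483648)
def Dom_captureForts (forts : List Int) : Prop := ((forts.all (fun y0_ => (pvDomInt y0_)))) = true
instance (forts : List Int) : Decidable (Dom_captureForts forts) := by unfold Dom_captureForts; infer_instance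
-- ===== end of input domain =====

-- B replaces A's single index walk (left pointer, forts[left] re-reads) by a run-length
-- encoding of the array followed by a max over group triples; same cost, different structure.

-- ===== PORT A =====
-- literal port of A: for right in range(len(forts)), state (count, left), reads via pyGetD
def captureForts (forts : List Int) : Int :=
  ((PySem.List.pyRange 0 (PySem.List.len forts)).foldl
    (fun (st : Int × Int) right =>
      if PySem.List.pyGetD forts right 0 ≠ 0 then
        (if (PySem.List.pyGetD forts st.2 0 = 1 ∧ PySem.List.pyGetD forts right 0 = -1) ∨
            (PySem.List.pyGetD forts st.2 0 = -1 ∧ PySem.List.pyGetD forts right 0 = 1) then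
          max st.1 (right - st.2 - 1)
         else st.1, right)
      else st) ((0 : Int), (0 : Int))).1

-- ===== PORT B =====
-- Source B's loop body building the run-length encoding (most recent group kept at the head;
-- Python appends at the end and mutates runs[-1], so the Lean list is reversed afterwards)
def pvStepB : List (Int × Int) → Int → List (Int × Int)
  | (w, c) :: rest, v => if w = v then (w, c + 1) :: rest else (v, 1) :: (w, c) :: rest
  | [], v => [(v, 1)]

-- literal port of Source B: run-length encode, then max over zip(runs, runs[1:], runs[2:]) with default 0
def captureForts_alt (forts : List Int) : Int :=
  let runs := (forts.foldl pvStepB []).reverse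
  PySem.List.maxD
    ((runs.zip ((runs.tail).zip (runs.tail.tail))).filterMap
      (fun t => if t.2.1.1 = 0 ∧ t.1.1 * t.2.2.1 = -1 then some t.2.1.2 else none))
    (fun y => y) 0

-- ===== PRECONDITION & SPEC =====
def Spec_captureForts (forts : List Int) (out : Int) : Prop := out = captureForts_alt forts
instance (forts : List Int) (out : Int) : Decidable (Spec_captureForts forts out) := by unfold Spec_captureForts; infer_instance

-- ===== CLAIM (what is proved, stated in full; the proofs are below) =====
def Claim_equal_captureForts : Prop := ∀ (forts : List Int), Dom_captureForts forts → Spec_captureForts forts (captureForts forts)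

-- ===== LEMMAS AND PROOFS =====

-- common reference scan: state (best, last non-zero value seen (0 if none), zeros since it)
def pvRun : Int → Int → Int → List Int → Int
  | best, _, _, [] => best
  | best, lv, z, x :: t =>
      if x = 0 then pvRun best lv (z + 1) t
      else pvRun (if lv * x = -1 then max best z else best) x 0 t

lemma mul_eq_neg_one_iff (a b : Int) :
    a * b = -1 ↔ (a = 1 ∧ b = -1) ∨ (a = -1 ∧ b = 1) := by
  constructor
  · intro h
    have hu : IsUnit a := IsUnit.of_mul_eq_one (b := -b) (by rw [mul_neg, h]; ring)
    rcases Int.isUnit_iff.mp hu with ha | ha <;> subst ha <;> [left; right] <;>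
      constructor <;> omega
  · rintro (⟨rfl, rfl⟩ | ⟨rfl, rfl⟩) <;> norm_num

-- ---- A side ----

-- A's loop body on (index, value) pairs
def pvStepA (forts : List Int) (st : Int × Int) (p : Int × Int) : Int × Int :=
  if p.2 ≠ 0 then
    (if (PySem.List.pyGetD forts st.2 0 = 1 ∧ p.2 = -1) ∨
        (PySem.List.pyGetD forts st.2 0 = -1 ∧ p.2 = 1) then
      max st.1 (p.1 - st.2 - 1)
     else st.1, p.1)
  else st

lemma captureForts_eq_enum (forts : List Int) :
    captureForts forts = ((PySem.List.enumerate forts).foldl (pvStepA forts) (0, 0)).1 := by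
  rw [PySem.List.enumerate_eq_map_pyRange forts 0, List.foldl_map]
  rfl

lemma enum_get (forts : List Int) :
    ∀ p ∈ PySem.List.enumerate forts, PySem.List.pyGetD forts p.1 0 = p.2 := by
  intro p hp
  rw [PySem.List.enumerate_eq_map_pyRange forts 0] at hp
  rcases List.mem_map.mp hp with ⟨j, _, rfl⟩
  rfl

lemma A_run (forts : List Int) :
    ∀ (xs : List Int) (k count left lv : Int),
      PySem.List.pyGetD forts left 0 = lv →
      (∀ p ∈ PySem.List.enumerate xs k, PySem.List.pyGetD forts p.1 0 = p.2) →
      ((PySem.List.enumerate xs k).foldl (pvStepA forts) (count, left)).1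
        = pvRun count lv (k - left - 1) xs := by
  intro xs
  induction xs with
  | nil => intro k count left lv _ _; simp [PySem.List.enumerate_nil, pvRun]
  | cons x t ih =>
    intro k count left lv hv hall
    rw [PySem.List.enumerate_cons]
    have hx : PySem.List.pyGetD forts k 0 = x :=
      hall (k, x) (List.mem_cons_self ..)
    have hall' : ∀ p ∈ PySem.List.enumerate t (k + 1), PySem.List.pyGetD forts p.1 0 = p.2 :=
      fun p hp => hall p (List.mem_cons_of_mem _ hp)
    by_cases hx0 : x = 0
    · subst hx0
      have hstep : pvStepA forts (count, left) (k, 0) = (count, left) := by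
        simp [pvStepA]
      rw [List.foldl_cons, hstep, ih (k + 1) count left lv hv hall']
      have hz : k + 1 - left - 1 = k - left - 1 + 1 := by ring
      rw [hz]
      simp [pvRun]
    · rw [List.foldl_cons]
      have hstep : pvStepA forts (count, left) (k, x)
          = (if (PySem.List.pyGetD forts left 0 = 1 ∧ x = -1) ∨
                (PySem.List.pyGetD forts left 0 = -1 ∧ x = 1) then
               max count (k - left - 1) else count, k) := by
        simp [pvStepA, hx0]
      rw [hstep, ih (k + 1) _ k x hx hall']
      rw [show pvRun count lv (k - left - 1) (x :: t)
          = pvRun (if lv * x = -1 then max count (k - left - 1) else count) x 0 t from by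
        simp [pvRun, hx0]]
      have h0 : (k + 1) - k - 1 = 0 := by ring
      rw [h0, hv]
      congr 1
      by_cases h : (lv = 1 ∧ x = -1) ∨ (lv = -1 ∧ x = 1)
      · rw [if_pos h, if_pos ((mul_eq_neg_one_iff lv x).mpr h)]
      · rw [if_neg h, if_neg (fun hm => h ((mul_eq_neg_one_iff lv x).mp hm))]

lemma pvRun_lv0 : ∀ (t : List Int) (b z z' : Int), pvRun b 0 z t = pvRun b 0 z' t := by
  intro t
  induction t with
  | nil => intro b z z'; rfl
  | cons x t ih =>
    intro b z z'
    by_cases hx : x = 0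
    · subst hx
      rw [show pvRun b 0 z ((0:Int) :: t) = pvRun b 0 (z+1) t from by simp [pvRun]]
      rw [show pvRun b 0 z' ((0:Int) :: t) = pvRun b 0 (z'+1) t from by simp [pvRun]]
      exact ih b (z + 1) (z' + 1)
    · simp [pvRun, hx]

lemma A_eq_run (forts : List Int) : captureForts forts = pvRun 0 0 0 forts := by
  rw [captureForts_eq_enum]
  rw [A_run forts forts 0 0 0 (PySem.List.pyGetD forts 0 0) rfl (enum_get forts)]
  have h1 : (0 : Int) - 0 - 1 = -1 := by norm_num
  rw [h1]
  cases forts with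
  | nil => rfl
  | cons x t =>
    rw [PySem.List.pyGetD_zero_cons]
    by_cases hx : x = 0
    · subst hx
      rw [show pvRun 0 0 (-1) ((0:Int) :: t) = pvRun 0 0 0 t from by simp [pvRun]]
      rw [show pvRun 0 0 0 ((0:Int) :: t) = pvRun 0 0 1 t from by simp [pvRun]]
      exact pvRun_lv0 t 0 0 1
    · have hxx : ¬ (x * x = -1) := by
        have := mul_self_nonneg x; intro h; linarith
      simp [pvRun, hx, hxx]

-- ---- B side ----

-- candidates of the triple scan, read with the MOST RECENT group first (pvStepB's orientation)
def pvCands : List (Int × Int) → List Int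
  | p :: q :: r :: t => (if q.1 = 0 ∧ p.1 * r.1 = -1 then [q.2] else []) ++ pvCands (q :: r :: t)
  | _ => []

def pvMax0 (l : List Int) : Int := l.foldl max 0

def pvHd : List (Int × Int) → Int
  | [] => 0
  | (u, _) :: _ => u

def pvLv : List (Int × Int) → Int
  | [] => 0
  | (w, _) :: r => if w = 0 then pvHd r else w

def pvZ : List (Int × Int) → Int
  | [] => 0
  | (w, c) :: _ => if w = 0 then c else 0

def pvLast2? : List (Int × Int) → Option ((Int × Int) × (Int × Int))
  | [a, b] => some (a, b)
  | _ :: b :: t => pvLast2? (b :: t)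
  | _ => none

lemma pvZip_eq : ∀ (l : List (Int × Int)),
    ((l.zip ((l.tail).zip (l.tail.tail))).filterMap
      (fun t => if t.2.1.1 = 0 ∧ t.1.1 * t.2.2.1 = -1 then some t.2.1.2 else none))
      = pvCands l := by
  intro l
  induction l using pvCands.induct with
  | case1 p q r t ih =>
    simp only [List.tail_cons, List.zip_cons_cons, List.filterMap_cons, pvCands]
    rw [← ih]
    split_ifs with h
    · rfl
    · rfl
  | case2 l h =>
    rcases l with _ | ⟨a, _ | ⟨b, _ | ⟨c, t⟩⟩⟩
    · rfl
    · rfl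
    · rfl
    · exact (h a b c t rfl).elim

lemma pvFoldlMax : ∀ (l : List Int) (a b : Int),
    l.foldl max (max a b) = max a (l.foldl max b) := by
  intro l
  induction l with
  | nil => intro a b; rfl
  | cons x l ih =>
    intro a b
    simp only [List.foldl_cons, max_assoc]
    exact ih a (max b x)

lemma pvMax0_nonneg (l : List Int) : 0 ≤ pvMax0 l :=
  (PySem.List.le_foldl_max l 0).1

lemma pvMax0_cons (c : Int) (l : List Int) : pvMax0 (c :: l) = max c (pvMax0 l) := by
  show List.foldl max (max 0 c) l = max c (List.foldl max 0 l)
  rw [max_comm (0 : Int) c]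
  exact pvFoldlMax l c 0

lemma pvMax0_reverse (l : List Int) : pvMax0 l.reverse = pvMax0 l := by
  induction l with
  | nil => rfl
  | cons x l ih =>
    rw [List.reverse_cons, pvMax0, List.foldl_append, pvMax0_cons, ← pvMax0]
    rw [ih]
    simp [max_comm]

lemma pvMaxD_eq (l : List Int) (h : ∀ y ∈ l, 0 ≤ y) :
    PySem.List.maxD l (fun y => y) 0 = pvMax0 l := by
  cases l with
  | nil => rfl
  | cons x t =>
    rw [PySem.List.maxD, PySem.List.max?_id_cons, Option.getD_some]
    show _ = List.foldl max (max 0 x) t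
    rw [max_eq_right (h x (List.mem_cons_self ..))]

lemma pvCands_head (w c c' : Int) (r : List (Int × Int)) :
    pvCands ((w, c) :: r) = pvCands ((w, c') :: r) := by
  match r with
  | [] => rfl
  | [q] => rfl
  | q :: r0 :: t => simp [pvCands]

lemma pvLast2?_append2 : ∀ (s : List (Int × Int)) (a b : Int × Int),
    pvLast2? (s ++ [a, b]) = some (a, b) := by
  intro s
  induction s with
  | nil => intro a b; rfl
  | cons x s ih =>
    intro a b
    have hred : pvLast2? ((x :: s) ++ [a, b]) = pvLast2? (s ++ [a, b]) := by
      cases s with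
      | nil => rfl
      | cons y s' => cases s' <;> rfl
    rw [hred]
    exact ih a b

lemma pvCands_snoc : ∀ (t : List (Int × Int)) (p q x : Int × Int),
    pvCands ((p :: q :: t) ++ [x])
      = pvCands (p :: q :: t) ++
        (match pvLast2? (p :: q :: t) with
         | some (a, b) => if b.1 = 0 ∧ a.1 * x.1 = -1 then [b.2] else []
         | none => []) := by
  intro t
  induction t with
  | nil =>
    intro p q x
    simp only [List.cons_append, List.nil_append, pvCands, pvLast2?, List.append_nil]
  | cons r t ih =>
    intro p q x
    have h2 : pvLast2? (p :: q :: r :: t) = pvLast2? (q :: r :: t) := by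
      cases t <;> rfl
    simp only [List.cons_append, pvCands, h2]
    rw [show q :: r :: (t ++ [x]) = (q :: r :: t) ++ [x] by simp]
    rw [ih q r x]
    simp [List.append_assoc]

lemma pvLast2?_reverse (t : List (Int × Int)) (q r : Int × Int) :
    pvLast2? ((q :: r :: t).reverse) = some (r, q) := by
  have h : (q :: r :: t).reverse = t.reverse ++ [r, q] := by simp
  rw [h, pvLast2?_append2]

lemma pvCands_reverse : ∀ (l : List (Int × Int)),
    pvCands l.reverse = (pvCands l).reverse := by
  intro l
  induction l using pvCands.induct with
  | case1 p q r t ih =>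
    have hrev : (p :: q :: r :: t).reverse = ((q :: r :: t).reverse) ++ [p] := by simp
    obtain ⟨u, v, s, hs⟩ : ∃ u v s, (q :: r :: t).reverse = u :: v :: s := by
      rcases hh : (q :: r :: t).reverse with _ | ⟨u, _ | ⟨v, s⟩⟩
      · exact absurd (congrArg List.length hh) (by simp)
      · exact absurd (congrArg List.length hh) (by simp)
      · exact ⟨u, v, s, rfl⟩
    rw [hrev, hs, pvCands_snoc, ← hs, pvLast2?_reverse, ih]
    have hcomm : (r.1 * p.1 = -1) = (p.1 * r.1 = -1) := by rw [mul_comm]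
    simp only [pvCands, hcomm, List.reverse_append]
    split_ifs with h
    · simp
    · simp
  | case2 l h =>
    rcases l with _ | ⟨a, _ | ⟨b, _ | ⟨c, t⟩⟩⟩
    · rfl
    · rfl
    · rfl
    · exact (h a b c t rfl).elim

lemma pvCounts : ∀ (xs : List Int) (R : List (Int × Int)),
    (∀ p ∈ R, 1 ≤ p.2) → ∀ p ∈ List.foldl pvStepB R xs, 1 ≤ p.2 := by
  intro xs
  induction xs with
  | nil => intro R h; exact h
  | cons x t ih =>
    intro R h
    rw [List.foldl_cons]
    apply ih
    match R, h with
    | [], _ =>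
      intro p hp
      simp only [pvStepB, List.mem_singleton] at hp
      rw [hp]
    | (w, c) :: r, h =>
      have hc : 1 ≤ c := h (w, c) (List.mem_cons_self ..)
      intro p hp
      simp only [pvStepB] at hp
      split_ifs at hp
      · rcases List.mem_cons.mp hp with hp1 | hm
        · rw [hp1]; simp; omega
        · exact h p (List.mem_cons_of_mem _ hm)
      · rcases List.mem_cons.mp hp with hp1 | hm
        · rw [hp1]
        · exact h p hm

lemma pvCands_nonneg : ∀ (R : List (Int × Int)),
    (∀ p ∈ R, 1 ≤ p.2) → ∀ y ∈ pvCands R, 0 ≤ y := by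
  intro R
  induction R using pvCands.induct with
  | case1 p q r t ih =>
    intro h y hy
    simp only [pvCands, List.mem_append] at hy
    rcases hy with hy | hy
    · have hq : 1 ≤ q.2 := h q (by simp)
      split_ifs at hy
      · simp at hy; omega
      · simp at hy
    · exact ih (fun p hp => h p (List.mem_cons_of_mem _ hp)) y hy
  | case2 l hl =>
    intro h y hy
    rcases l with _ | ⟨a, _ | ⟨b, _ | ⟨c, t⟩⟩⟩
    · simp [pvCands] at hy
    · simp [pvCands] at hy
    · simp [pvCands] at hy
    · exact (hl a b c t rfl).elim

-- one loop step of B's run-length fold matches one step of the reference scan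
lemma pvStep_state (t : List Int) (R : List (Int × Int)) (x : Int) :
    pvRun (pvMax0 (pvCands R)) (pvLv R) (pvZ R) (x :: t)
      = pvRun (pvMax0 (pvCands (pvStepB R x))) (pvLv (pvStepB R x)) (pvZ (pvStepB R x)) t := by
  have hrun0 : ∀ b lv z, pvRun b lv z ((0 : Int) :: t) = pvRun b lv (z + 1) t := by
    intro b lv z; simp [pvRun]
  have hrunx : x ≠ 0 → ∀ b lv z,
      pvRun b lv z (x :: t) = pvRun (if lv * x = -1 then max b z else b) x 0 t := by
    intro hx b lv z; simp [pvRun, hx]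
  by_cases hx : x = 0
  · subst hx
    rw [hrun0]
    match R with
    | [] =>
      rw [show pvStepB [] 0 = [(0, 1)] from rfl]
      simp [pvCands, pvLv, pvZ, pvHd, pvMax0]
    | (w, c) :: r =>
      by_cases hw : w = 0
      · subst hw
        rw [show pvStepB ((0, c) :: r) 0 = (0, c + 1) :: r from by simp [pvStepB]]
        rw [pvCands_head 0 (c + 1) c r]
        simp [pvLv, pvZ]
      · rw [show pvStepB ((w, c) :: r) 0 = (0, 1) :: (w, c) :: r from by simp [pvStepB, hw]]
        have hcc : pvCands ((0, 1) :: (w, c) :: r) = pvCands ((w, c) :: r) := by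
          cases r with
          | nil => rfl
          | cons r0 t2 => simp [pvCands, hw]
        rw [hcc]
        simp [pvLv, pvZ, pvHd, hw]
  · rw [hrunx hx]
    match R with
    | [] =>
      rw [show pvStepB [] x = [(x, 1)] from rfl]
      simp [pvCands, pvLv, pvZ, pvHd, pvMax0, hx]
    | (w, c) :: r =>
      by_cases hwx : w = x
      · subst hwx
        rw [show pvStepB ((w, c) :: r) w = (w, c + 1) :: r from by simp [pvStepB]]
        rw [pvCands_head w (c + 1) c r]
        have hww : ¬ (w * w = -1) := by
          have := mul_self_nonneg w; intro hcon; linarith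
        simp [pvLv, pvZ, hx, hww]
      · rw [show pvStepB ((w, c) :: r) x = (x, 1) :: (w, c) :: r from by
          simp [pvStepB, hwx]]
        by_cases hw : w = 0
        · subst hw
          match r with
          | [] =>
            simp [pvCands, pvLv, pvZ, pvHd, hx, pvMax0]
          | (u, cu) :: r2 =>
            have hcc : pvCands ((x, 1) :: (0, c) :: (u, cu) :: r2)
                = (if x * u = -1 then [c] else []) ++ pvCands ((0, c) :: (u, cu) :: r2) := by
              simp [pvCands]
            rw [hcc]
            have hL : pvLv ((0, c) :: (u, cu) :: r2) = u := by simp [pvLv, pvHd]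
            have hL' : pvLv ((x, 1) :: (0, c) :: (u, cu) :: r2) = x := by simp [pvLv, hx]
            have hZ : pvZ ((0, c) :: (u, cu) :: r2) = c := by simp [pvZ]
            have hZ' : pvZ ((x, 1) :: (0, c) :: (u, cu) :: r2) = 0 := by simp [pvZ, hx]
            rw [hL, hL', hZ, hZ']
            congr 1
            by_cases hcond : x * u = -1
            · rw [if_pos hcond, if_pos (by rw [mul_comm]; exact hcond)]
              rw [List.singleton_append, pvMax0_cons]
              exact max_comm _ _
            · rw [if_neg hcond, if_neg (fun hcon => hcond (by rw [mul_comm]; exact hcon))]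
              rw [List.nil_append]
        · have hcc : pvCands ((x, 1) :: (w, c) :: r) = pvCands ((w, c) :: r) := by
            cases r with
            | nil => rfl
            | cons r0 t2 => simp [pvCands, hw]
          rw [hcc]
          have hZ : pvZ ((w, c) :: r) = 0 := by simp [pvZ, hw]
          rw [hZ]
          have hB : (if pvLv ((w, c) :: r) * x = -1
              then max (pvMax0 (pvCands ((w, c) :: r))) 0
              else pvMax0 (pvCands ((w, c) :: r))) = pvMax0 (pvCands ((w, c) :: r)) := by
            split_ifs with hcon
            · exact max_eq_left (pvMax0_nonneg _)
            · rfl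
          rw [hB]
          simp [pvLv, pvZ, hx]

lemma B_run : ∀ (xs : List Int) (R : List (Int × Int)),
    pvRun (pvMax0 (pvCands R)) (pvLv R) (pvZ R) xs
      = pvMax0 (pvCands (List.foldl pvStepB R xs)) := by
  intro xs
  induction xs with
  | nil => intro R; rfl
  | cons x t ih =>
    intro R
    rw [List.foldl_cons, pvStep_state t R x]
    exact ih (pvStepB R x)

lemma B_eq_run (forts : List Int) : captureForts_alt forts = pvRun 0 0 0 forts := by
  have hc : ∀ p ∈ List.foldl pvStepB [] forts, 1 ≤ p.2 :=
    pvCounts forts [] (by simp)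
  have hnn : ∀ y ∈ pvCands ((List.foldl pvStepB [] forts).reverse), 0 ≤ y := by
    apply pvCands_nonneg
    intro p hp
    exact hc p (List.mem_reverse.mp hp)
  show PySem.List.maxD _ _ _ = _
  rw [pvZip_eq, pvMaxD_eq _ hnn, pvCands_reverse, pvMax0_reverse]
  rw [← B_run forts []]
  rfl

-- ===== VERDICT (by name: the statement is the Claim_ definition above) =====
theorem captureForts_spec : Claim_equal_captureForts := by
  intro forts _
  show captureForts forts = captureForts_alt forts
  rw [A_eq_run, B_eq_run]
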